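-- pv_equiv track=rewrite | github.com/Alvaropz/Python_problems_BinarySearch | 1. Easy/double_reverse_swap/double_reverse_swap.py | double_reverse_swap
-- ===== SOURCE A (Python) =====
-- def double_reverse_swap(n):
--     given_s = "xxy"
--     pattern = 0
--     actions = 0
--     while actions < n:
--         if pattern == 0:
--             given_s *= 2
--         elif pattern == 1:
--             given_s = given_s[::-1]
--         elif pattern == 2:
--             given_s = given_s.replace('x', '%temp%').replace('y', 'x').replace('%temp%', 'y')
--             pattern = -1
--         actions += 1
--         pattern += 1
--     return given_s
-- ===== SOURCE B (Python) =====
-- _SWAP = str.maketrans("xy", "yx")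
--
-- def double_reverse_swap(n):
--     s = "xxy"
--     if n <= 0:
--         return s
--     q, r = divmod(n, 3)
--     for _ in range(q):
--         # one full double->reverse->swap cycle collapsed: reverse(s*2) = reverse(s)*2
--         # and swapping commutes with doubling, so the cycle is swap(reverse(s)) * 2
--         s = s[::-1].translate(_SWAP) * 2
--     if r >= 1:
--         s = s * 2
--     if r == 2:
--         s = s[::-1]
--     return s
-- ===== Notes on version B (the rewrite author's own statement) =====
-- stated objective: alternative
-- what changed: Replaces the per-step pattern state machine (which cycles double/reverse/swap and swaps via a six-character '%temp%' replace chain) by whole collapsed cycles s = swap(reverse(s))*2 done with str.translate, followed by the leftover double/reverse steps.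
import Mathlib
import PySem

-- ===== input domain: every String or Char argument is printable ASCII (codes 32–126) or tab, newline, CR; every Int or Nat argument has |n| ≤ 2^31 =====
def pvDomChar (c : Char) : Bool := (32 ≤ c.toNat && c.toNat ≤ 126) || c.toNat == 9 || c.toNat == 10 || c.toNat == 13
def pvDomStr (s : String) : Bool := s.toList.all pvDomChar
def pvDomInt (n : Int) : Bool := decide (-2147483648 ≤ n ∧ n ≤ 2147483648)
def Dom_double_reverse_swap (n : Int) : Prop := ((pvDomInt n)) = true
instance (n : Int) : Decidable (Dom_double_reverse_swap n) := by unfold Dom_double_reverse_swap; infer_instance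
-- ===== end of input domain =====

-- B collapses A's per-step pattern state machine into whole cycles s = swap(reverse(s))*2 plus the leftover double/reverse steps, swapping with a single-pass translate instead of the '%temp%' replace chain (alternative decomposition).

-- ===== PORT A =====
-- the '%temp%' replace chain of A, verbatim
def drsReplaceChain (s : List Char) : List Char :=
  PySem.Chars.replace (PySem.Chars.replace (PySem.Chars.replace s ['x'] "%temp%".toList) ['y'] ['x']) "%temp%".toList ['y']

-- A's while loop, step for step (strings as their char lists; PySem.Str.f is a thin wrapper over PySem.Chars.f)
def drsLoopA (n : Int) (given_s : List Char) (pattern : Int) (actions : Int) : List Char :=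
  if h : actions < n then
    if pattern = 0 then
      drsLoopA n (given_s ++ given_s) (pattern + 1) (actions + 1)
    else if pattern = 1 then
      -- given_s[::-1]: step is the literal -1, so slice? is always some (slice?_none_none_neg_one); the getD default is unreachable
      drsLoopA n ((PySem.List.slice? given_s none none (-1)).getD []) (pattern + 1) (actions + 1)
    else if pattern = 2 then
      drsLoopA n (drsReplaceChain given_s) ((-1) + 1) (actions + 1)
    else
      drsLoopA n given_s (pattern + 1) (actions + 1)
  else given_s
termination_by (n - actions).toNat
decreasing_by all_goals (simp_wf; omega)

def double_reverse_swap (n : Int) : String :=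
  String.ofList (drsLoopA n "xxy".toList 0 0)

-- ===== PORT B =====
-- str.translate(str.maketrans("xy","yx")): exact, translate maps each code point independently
def drsSwapXY (s : List Char) : List Char :=
  s.map (fun c => if c = 'x' then 'y' else if c = 'y' then 'x' else c)

def double_reverse_swap_alt (n : Int) : String :=
  let s0 := "xxy".toList
  if n ≤ 0 then String.ofList s0
  else
    let q := PySem.Int.floordiv n 3
    let r := PySem.Int.mod n 3
    -- range(q): q ≥ 0 here (n > 0), so range(q) is exactly List.range q.toNat
    let s1 := (List.range q.toNat).foldl
      (fun s _ =>
        let t := drsSwapXY ((PySem.List.slice? s none none (-1)).getD [])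
        t ++ t) s0
    let s2 := if 1 ≤ r then s1 ++ s1 else s1
    let s3 := if r = 2 then (PySem.List.slice? s2 none none (-1)).getD [] else s2
    String.ofList s3

-- ===== PRECONDITION & SPEC =====
def Spec_double_reverse_swap (n : Int) (out : String) : Prop := out = double_reverse_swap_alt n
instance (n : Int) (out : String) : Decidable (Spec_double_reverse_swap n out) := by unfold Spec_double_reverse_swap; infer_instance

-- ===== CLAIM (what is proved, stated in full; the proofs are below) =====
def Claim_equal_double_reverse_swap : Prop := ∀ (n : Int), Dom_double_reverse_swap n → Spec_double_reverse_swap n (double_reverse_swap n)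

-- ===== LEMMAS AND PROOFS =====

-- s[::-1] is reverse
lemma drs_rev_eq (s : List Char) : (PySem.List.slice? s none none (-1)).getD [] = s.reverse := by
  simp [PySem.List.slice?_none_none_neg_one]

-- strings consisting only of 'x' and 'y' (the loop invariant under which the replace chain is a char swap)
def OnlyXY (s : List Char) : Prop := ∀ c ∈ s, c = 'x' ∨ c = 'y'

-- one full cycle of B: double-reverse-swap collapsed to swap(reverse(s)) * 2
def drsCyc (s : List Char) : List Char := drsSwapXY s.reverse ++ drsSwapXY s.reverse

-- what replace with a one-char pattern does
lemma drs_go_single (o : Char) (new : List Char) :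
    ∀ (l : List Char) (fuel : Nat) (acc : List Char), l.length ≤ fuel →
    PySem.Chars.replace.go [o] new fuel l acc
      = acc.reverse ++ l.flatMap (fun c => if c = o then new else [c]) := by
  intro l
  induction l with
  | nil =>
    intro fuel acc _
    cases fuel <;> simp [PySem.Chars.replace.go]
  | cons c t ih =>
    intro fuel acc hle
    cases fuel with
    | zero => simp at hle
    | succ f =>
      rw [PySem.Chars.replace.go]
      by_cases hco : c = o
      · subst hco
        simp [List.isPrefixOf, ih f _ (by simpa using hle)]
      · have hpre : [o].isPrefixOf (c :: t) = false := by
          simp [List.isPrefixOf]; exact fun h => hco h.symm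
        simp [hpre, hco, ih f _ (by simpa using hle)]

lemma drs_replace_single (s : List Char) (o : Char) (new : List Char) :
    PySem.Chars.replace s [o] new = s.flatMap (fun c => if c = o then new else [c]) := by
  rw [PySem.Chars.replace]
  simpa using drs_go_single o new s s.length [] (le_refl _)

-- the intermediate string after the first two replaces of the chain
def drsExpand (l : List Char) : List Char :=
  l.flatMap (fun c => if c = 'x' then "%temp%".toList else ['x'])

-- replacing '%temp%' by 'y' in the expanded string recovers the char swap
lemma drs_go_temp :
    ∀ (l : List Char) (fuel : Nat) (acc : List Char), OnlyXY l → (drsExpand l).length ≤ fuel →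
    PySem.Chars.replace.go "%temp%".toList ['y'] fuel (drsExpand l) acc
      = acc.reverse ++ drsSwapXY l := by
  intro l
  induction l with
  | nil =>
    intro fuel acc _ _
    cases fuel <;> simp [PySem.Chars.replace.go, drsExpand, drsSwapXY]
  | cons c t ih =>
    intro fuel acc hxy hle
    have hxyt : OnlyXY t := fun d hd => hxy d (List.mem_cons_of_mem _ hd)
    rcases hxy c List.mem_cons_self with hc | hc <;> subst hc
    · have hexp : drsExpand ('x' :: t) = '%'::'t'::'e'::'m'::'p'::'%':: drsExpand t := by
        simp [drsExpand]
      rw [hexp] at hle ⊢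
      have hlen : (drsExpand t).length + 6 ≤ fuel := by simpa using hle
      obtain ⟨f, rfl⟩ : ∃ f, fuel = f + 1 := ⟨fuel - 1, by omega⟩
      rw [PySem.Chars.replace.go.eq_def]
      have htl : "%temp%".toList = ['%','t','e','m','p','%'] := rfl
      have hpre : (['%','t','e','m','p','%'] : List Char).isPrefixOf ('%'::'t'::'e'::'m'::'p'::'%':: drsExpand t) = true := by
        simp [List.isPrefixOf]
      have ih' := ih f ('y' :: acc) hxyt (by omega)
      rw [htl] at ih' ⊢
      simp only [hpre, if_true, List.length_cons, List.length_nil]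
      norm_num [List.drop]
      rw [ih']
      simp [drsSwapXY]
    · have hexp : drsExpand ('y' :: t) = 'x' :: drsExpand t := by
        simp [drsExpand]
      rw [hexp] at hle ⊢
      obtain ⟨f, rfl⟩ : ∃ f, fuel = f + 1 := ⟨fuel - 1, by simp at hle; omega⟩
      rw [PySem.Chars.replace.go.eq_def]
      have htl : "%temp%".toList = ['%','t','e','m','p','%'] := rfl
      have hpre : (['%','t','e','m','p','%'] : List Char).isPrefixOf ('x' :: drsExpand t) = false := by
        simp [List.isPrefixOf]
      have ih' := ih f ('x' :: acc) hxyt (by simp at hle; omega)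
      rw [htl] at ih' ⊢
      simp only [hpre, Bool.false_eq_true, if_false]
      rw [ih']
      simp [drsSwapXY]

-- the first two replaces of the chain produce the expanded string
lemma drs_expand_steps :
    ∀ (s : List Char), OnlyXY s →
    (s.flatMap (fun c => if c = 'x' then "%temp%".toList else [c])).flatMap
      (fun c => if c = 'y' then ['x'] else [c]) = drsExpand s := by
  intro s
  induction s with
  | nil => intro _; simp [drsExpand]
  | cons c t ih =>
    intro hxy
    have hxyt : OnlyXY t := fun d hd => hxy d (List.mem_cons_of_mem _ hd)
    have hexp : drsExpand (c :: t) = (if c = 'x' then "%temp%".toList else ['x']) ++ drsExpand t := by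
      simp [drsExpand]
    have htl : "%temp%".toList = ['%','t','e','m','p','%'] := rfl
    have ih' := ih hxyt
    simp only [htl] at ih'
    rcases hxy c List.mem_cons_self with rfl | rfl <;>
      simp [hexp, htl, List.flatMap_cons, ih']

-- the whole '%temp%' chain is the char swap on {x,y}-strings
lemma drs_chain_eq (s : List Char) (hxy : OnlyXY s) : drsReplaceChain s = drsSwapXY s := by
  unfold drsReplaceChain
  rw [drs_replace_single, drs_replace_single]
  rw [drs_expand_steps s hxy, PySem.Chars.replace]
  have : ("%temp%".toList).isEmpty = false := rfl
  simp only [this, Bool.false_eq_true, if_false]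
  simpa using drs_go_temp s (drsExpand s).length [] hxy (le_refl _)

-- loop-step lemmas for A's while loop
lemma drs_loopA_exit (n : Int) (s : List Char) (p a : Int) (h : ¬ a < n) :
    drsLoopA n s p a = s := by
  rw [drsLoopA]; simp [h]

lemma drs_loopA_d (n : Int) (s : List Char) (a : Int) (h : a < n) :
    drsLoopA n s 0 a = drsLoopA n (s ++ s) 1 (a + 1) := by
  rw [drsLoopA]; simp [h]

lemma drs_loopA_r (n : Int) (s : List Char) (a : Int) (h : a < n) :
    drsLoopA n s 1 a = drsLoopA n s.reverse 2 (a + 1) := by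
  rw [drsLoopA]; simp [h, drs_rev_eq]

lemma drs_loopA_s (n : Int) (s : List Char) (a : Int) (h : a < n) (hxy : OnlyXY s) :
    drsLoopA n s 2 a = drsLoopA n (drsSwapXY s) 0 (a + 1) := by
  rw [drsLoopA]; simp [h, drs_chain_eq s hxy]

-- invariant preservation
lemma drs_onlyXY_append {s t : List Char} (hs : OnlyXY s) (ht : OnlyXY t) : OnlyXY (s ++ t) := by
  intro c hc; rcases List.mem_append.mp hc with h | h; exacts [hs c h, ht c h]

lemma drs_onlyXY_reverse {s : List Char} (hs : OnlyXY s) : OnlyXY s.reverse := by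
  intro c hc; exact hs c (List.mem_reverse.mp hc)

lemma drs_onlyXY_swap {s : List Char} (hs : OnlyXY s) : OnlyXY (drsSwapXY s) := by
  intro c hc
  rcases List.mem_map.mp hc with ⟨d, hd, rfl⟩
  rcases hs d hd with rfl | rfl <;> simp

lemma drs_onlyXY_cyc {s : List Char} (hs : OnlyXY s) : OnlyXY (drsCyc s) :=
  drs_onlyXY_append (drs_onlyXY_swap (drs_onlyXY_reverse hs)) (drs_onlyXY_swap (drs_onlyXY_reverse hs))

-- three steps of A from pattern 0 are one collapsed cycle
lemma drs_cycle (n : Int) (s : List Char) (a : Int) (h3 : a + 3 ≤ n) (hxy : OnlyXY s) :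
    drsLoopA n s 0 a = drsLoopA n (drsCyc s) 0 (a + 3) := by
  rw [drs_loopA_d n s a (by omega),
      drs_loopA_r n (s ++ s) (a + 1) (by omega),
      drs_loopA_s n (s ++ s).reverse (a + 1 + 1) (by omega)
        (drs_onlyXY_reverse (drs_onlyXY_append hxy hxy))]
  have h1 : drsSwapXY (s ++ s).reverse = drsCyc s := by
    simp [drsCyc, drsSwapXY, List.reverse_append]
  have h2 : a + 1 + 1 + 1 = a + 3 := by ring
  rw [h1, h2]

-- the main characterisation of A's loop: q collapsed cycles, then the r leftover steps
lemma drs_key (n r : Int) (hr0 : 0 ≤ r) (hr3 : r < 3) :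
    ∀ (q : Nat) (a : Int) (s : List Char), OnlyXY s → n - a = 3 * q + r →
    drsLoopA n s 0 a =
      (if r = 2
       then ((if 1 ≤ r then drsCyc^[q] s ++ drsCyc^[q] s else drsCyc^[q] s).reverse)
       else (if 1 ≤ r then drsCyc^[q] s ++ drsCyc^[q] s else drsCyc^[q] s)) := by
  intro q
  induction q with
  | zero =>
    intro a s hxy hsum
    simp only [Nat.cast_zero, mul_zero, zero_add] at hsum
    rcases (by omega : r = 0 ∨ r = 1 ∨ r = 2) with rfl | rfl | rfl
    · rw [drs_loopA_exit n s 0 a (by omega)]; norm_num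
    · rw [drs_loopA_d n s a (by omega), drs_loopA_exit n _ 1 (a+1) (by omega)]; norm_num
    · rw [drs_loopA_d n s a (by omega), drs_loopA_r n _ (a+1) (by omega),
          drs_loopA_exit n _ 2 (a+1+1) (by omega)]
      norm_num
  | succ q ih =>
    intro a s hxy hsum
    rw [drs_cycle n s a (by push_cast at hsum ⊢; omega) hxy]
    rw [ih (a + 3) (drsCyc s) (drs_onlyXY_cyc hxy) (by push_cast at hsum ⊢; omega)]
    simp only [← Function.iterate_succ_apply]

-- B's foldl over range(q) iterates the cycle
lemma drs_foldl_range (f : List Char → List Char) :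
    ∀ (k : Nat) (s : List Char), (List.range k).foldl (fun s _ => f s) s = f^[k] s := by
  intro k
  induction k with
  | zero => intro s; simp
  | succ k ih =>
    intro s
    rw [List.range_succ, List.foldl_append, ih]
    simp [Function.iterate_succ_apply']

-- ===== VERDICT (by name: the statement is the Claim_ definition above) =====
theorem double_reverse_swap_spec : Claim_equal_double_reverse_swap := by
  intro n _
  unfold Spec_double_reverse_swap double_reverse_swap double_reverse_swap_alt
  by_cases hn : n ≤ 0
  · rw [drs_loopA_exit n _ 0 0 (by omega)]
    simp [hn]
  · simp only [if_neg hn]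
    have h3 : (0:Int) < 3 := by norm_num
    have hr0 : 0 ≤ PySem.Int.mod n 3 := PySem.Int.mod_nonneg n h3
    have hr3 : PySem.Int.mod n 3 < 3 := PySem.Int.mod_lt n h3
    have hq : 0 ≤ PySem.Int.floordiv n 3 := by
      rw [← zero_mul (3:Int)] at *
      exact (PySem.Int.le_floordiv_iff_mul_le h3).mpr (by omega)
    have hsum := PySem.Int.floordiv_mul_add_mod n 3
    have hcast : ((PySem.Int.floordiv n 3).toNat : Int) = PySem.Int.floordiv n 3 :=
      Int.toNat_of_nonneg hq
    have hkey := drs_key n (PySem.Int.mod n 3) hr0 hr3 (PySem.Int.floordiv n 3).toNat 0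
      "xxy".toList (by
        intro c hc
        rw [show "xxy".toList = ['x','x','y'] from rfl] at hc
        simp at hc
        rcases hc with rfl | rfl <;> simp) (by rw [hcast]; omega)
    rw [hkey]
    simp only [drs_rev_eq]
    rw [drs_foldl_range (fun s => drsSwapXY s.reverse ++ drsSwapXY s.reverse)]
    rfl
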